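-- pv_equiv track=rewrite | github.com/QUAY17/JENNY | pipeline/jenny_pipeline.py | find_para_start
-- ===== SOURCE A (Python) =====
-- def find_para_start(doc_xml, pos):
--     """Find the start of the enclosing <w:p> paragraph, not <w:pStyle> or <w:pPr>."""
--     search_from = pos
--     while search_from >= 0:
--         idx = doc_xml.rfind("<w:p", 0, search_from)
--         if idx == -1:
--             return -1
--         next_char = doc_xml[idx + 4:idx + 5]
--         if next_char in (" ", ">"):
--             return idx
--         search_from = idx - 1
--     return -1
-- ===== SOURCE B (Python) =====
-- def find_para_start(doc_xml, pos):
--     """Find the start of the enclosing <w:p> paragraph, not <w:pStyle> or <w:pPr>."""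
--     if pos < 0:
--         return -1
--     return max(doc_xml.rfind("<w:p ", 0, pos + 1), doc_xml.rfind("<w:p>", 0, pos + 1))
-- ===== Notes on version B (the rewrite author's own statement) =====
-- stated objective: simpler
-- what changed: Replaces A's backward scan-and-filter loop over '<w:p' hits (rfind, check next char, retry) by a single guard plus the max of two exact-pattern rfind searches for '<w:p ' and '<w:p>' bounded by pos+1.
import Mathlib
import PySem

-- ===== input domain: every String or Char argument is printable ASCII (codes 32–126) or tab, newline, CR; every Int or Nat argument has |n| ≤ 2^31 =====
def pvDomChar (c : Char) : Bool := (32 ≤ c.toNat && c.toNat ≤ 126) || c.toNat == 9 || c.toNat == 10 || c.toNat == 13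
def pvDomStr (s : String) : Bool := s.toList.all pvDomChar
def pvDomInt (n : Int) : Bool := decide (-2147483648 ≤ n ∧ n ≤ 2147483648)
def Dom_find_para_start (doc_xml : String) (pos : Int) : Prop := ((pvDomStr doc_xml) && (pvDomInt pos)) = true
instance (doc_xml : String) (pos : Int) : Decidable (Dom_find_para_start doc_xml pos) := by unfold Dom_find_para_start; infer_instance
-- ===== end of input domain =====

-- B replaces A's backward scan-and-filter loop over "<w:p" hits by the max of two exact-pattern
-- rfind searches ("<w:p " and "<w:p>") with end bound pos+1; objective: simpler (no measured speedup claimed).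

-- ===== PORT A =====
-- A's while-loop; the fuel argument only makes the recursion total: search_from strictly
-- decreases by at least 5 each iteration, so fuel = pos.toNat + 1 is never exhausted.
def findParaLoopA (doc_xml : String) (fuel : Nat) (search_from : Int) : Int :=
  match fuel with
  | 0 => -1
  | fuel + 1 =>
    if 0 ≤ search_from then
      let idx := PySem.Str.rfindFrom doc_xml "<w:p" 0 (some search_from)
      if idx = -1 then -1
      else
        let next_char := PySem.Str.slice doc_xml (some (idx + 4)) (some (idx + 5))
        if next_char = " " ∨ next_char = ">" then idx
        else findParaLoopA doc_xml fuel (idx - 1)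
    else -1

def find_para_start (doc_xml : String) (pos : Int) : Int :=
  findParaLoopA doc_xml (pos.toNat + 1) pos

-- ===== PORT B =====
def find_para_start_alt (doc_xml : String) (pos : Int) : Int :=
  if pos < 0 then -1
  else max (PySem.Str.rfindFrom doc_xml "<w:p " 0 (some (pos + 1)))
           (PySem.Str.rfindFrom doc_xml "<w:p>" 0 (some (pos + 1)))

-- ===== PRECONDITION & SPEC =====
def Spec_find_para_start (doc_xml : String) (pos : Int) (out : Int) : Prop := out = find_para_start_alt doc_xml pos
instance (doc_xml : String) (pos : Int) (out : Int) : Decidable (Spec_find_para_start doc_xml pos out) := by unfold Spec_find_para_start; infer_instance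

-- ===== CLAIM (what is proved, stated in full; the proofs are below) =====
def Claim_equal_find_para_start : Prop := ∀ (doc_xml : String) (pos : Int), Dom_find_para_start doc_xml pos → Spec_find_para_start doc_xml pos (find_para_start doc_xml pos)

-- ===== LEMMAS AND PROOFS =====

-- an occurrence of "<w:p" at index i of s
def Occ4 (s : List Char) (i : Nat) : Prop := "<w:p".toList <+: s.drop i
-- a "good" occurrence: "<w:p " or "<w:p>" at index i
def OccG (s : List Char) (i : Nat) : Prop :=
  "<w:p ".toList <+: s.drop i ∨ "<w:p>".toList <+: s.drop i

-- the common characterisation both ports are proved to satisfy: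
-- r is -1 and no good occurrence fits in the window [0, m), or r is the largest good occurrence there
def IsRes (s : List Char) (m : Nat) (r : Int) : Prop :=
  (r = -1 ∧ ∀ i : Nat, i + 5 ≤ m → ¬ OccG s i) ∨
  (∃ k : Nat, r = (k : Int) ∧ k + 5 ≤ m ∧ OccG s k ∧ ∀ i : Nat, k < i → i + 5 ≤ m → ¬ OccG s i)

lemma isres_unique (s : List Char) (m : Nat) (r1 r2 : Int)
    (h1 : IsRes s m r1) (h2 : IsRes s m r2) : r1 = r2 := by
  rcases h1 with ⟨e1, n1⟩ | ⟨k1, e1, w1, g1, mx1⟩ <;>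
    rcases h2 with ⟨e2, n2⟩ | ⟨k2, e2, w2, g2, mx2⟩
  · omega
  · exact absurd g2 (n1 _ w2)
  · exact absurd g1 (n2 _ w1)
  · subst e1 e2
    rcases Nat.lt_trichotomy k1 k2 with h | h | h
    · exact absurd g2 (mx1 _ h w2)
    · omega
    · exact absurd g1 (mx2 _ h w1)

lemma occ_char (s sub : List Char) (j k : Nat) (h : sub <+: s.drop j) (hk : k < sub.length) :
    s[j + k]? = some sub[k] := by
  have hl : sub.length ≤ s.length - j := by simpa using h.length_le
  have hd : k < (s.drop j).length := by simp; omega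
  have h1 : sub[k] = (s.drop j)[k] := List.IsPrefix.getElem h hk
  have h2 : (s.drop j)[k] = s[j + k]'(by omega) := List.getElem_drop
  rw [List.getElem?_eq_getElem (by omega), ← h2, h1]

lemma occG_len (s : List Char) (i : Nat) (h : OccG s i) : i + 5 ≤ s.length := by
  rcases h with h | h <;> · have := h.length_le; simp at this; omega

lemma occG_occ4 (s : List Char) (i : Nat) (h : OccG s i) : Occ4 s i := by
  have h4 : ("<w:p".toList : List Char).length = 4 := by decide
  rcases h with h | h
  · exact List.IsPrefix.trans (by decide) h
  · exact List.IsPrefix.trans (by decide) h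

lemma occG_char (s : List Char) (i : Nat) (h : OccG s i) :
    s[i + 4]? = some ' ' ∨ s[i + 4]? = some '>' := by
  rcases h with h | h
  · exact Or.inl (occ_char s _ i 4 h (by decide))
  · exact Or.inr (occ_char s _ i 4 h (by decide))

lemma occ4_char0 (s : List Char) (i : Nat) (h : Occ4 s i) : s[i + 0]? = some '<' :=
  occ_char s _ i 0 h (by decide)

-- two "<w:p" occurrences cannot overlap at distance 1, 2 or 3
lemma occ4_no_overlap (s : List Char) (j d : Nat) (hd1 : 1 ≤ d) (hd2 : d ≤ 3)
    (h1 : Occ4 s j) (h2 : Occ4 s (j + d)) : False := by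
  have hd : d < ("<w:p".toList : List Char).length := by simpa using by omega
  have ha := occ_char s "<w:p".toList j d h1 hd
  have hb : s[j + d + 0]? = some '<' := occ4_char0 s _ h2
  simp at hb
  rw [hb] at ha
  interval_cases d <;> simp_all

-- a good occurrence strictly below a plain occurrence lies at least 5 positions below it
lemma good_gap (s : List Char) (idx i : Nat) (h4 : Occ4 s idx) (hg : OccG s i)
    (hlt : i < idx) : i + 5 ≤ idx := by
  by_contra hc
  rcases Nat.lt_or_ge (idx - i) 4 with h | h
  · -- distance 1..3 overlap
    have hi4 : Occ4 s i := occG_occ4 s i hg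
    have hsh : Occ4 s (i + (idx - i)) := by
      have : i + (idx - i) = idx := by omega
      rw [this]; exact h4
    exact occ4_no_overlap s i (idx - i) (by omega) (by omega) hi4 hsh
  · -- idx = i + 4 : the character after the good occurrence would have to be '<'
    have he : i + 4 = idx := by omega
    have h0 : s[idx + 0]? = some '<' := occ4_char0 s idx h4
    have hch := occG_char s i hg
    rw [he] at hch
    simp at h0
    rcases hch with h' | h' <;> simp_all

-- characterisation of PySem's rfind.go: the greatest index ≤ j where sub starts, else -1
lemma go_cases (s sub : List Char) (j : Nat) :
    (PySem.Chars.rfind.go s sub j = -1 ∧ ∀ i : Nat, i ≤ j → ¬ sub <+: s.drop i) ∨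
    (∃ k : Nat, PySem.Chars.rfind.go s sub j = (k : Int) ∧ k ≤ j ∧ sub <+: s.drop k ∧
      ∀ i : Nat, k < i → i ≤ j → ¬ sub <+: s.drop i) := by
  induction j with
  | zero =>
    by_cases h : sub.isPrefixOf s
    · refine Or.inr ⟨0, ?_, le_refl _, by simpa [List.isPrefixOf_iff_prefix] using h, by omega⟩
      simp [PySem.Chars.rfind.go, h]
    · refine Or.inl ⟨by simp [PySem.Chars.rfind.go, h], ?_⟩
      intro i hi
      interval_cases i
      simpa [List.isPrefixOf_iff_prefix] using h
  | succ j ih =>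
    by_cases h : sub.isPrefixOf (s.drop (j + 1))
    · refine Or.inr ⟨j + 1, ?_, le_refl _, by simpa [List.isPrefixOf_iff_prefix] using h, by omega⟩
      simp [PySem.Chars.rfind.go, h]
    · have hstep : PySem.Chars.rfind.go s sub (j + 1) = PySem.Chars.rfind.go s sub j := by
        simp [PySem.Chars.rfind.go, h]
      have hnot : ¬ sub <+: s.drop (j + 1) := by
        simpa [List.isPrefixOf_iff_prefix] using h
      rcases ih with ⟨e, hn⟩ | ⟨k, e, hk, hp, hmx⟩
      · refine Or.inl ⟨by rw [hstep]; exact e, ?_⟩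
        intro i hi
        rcases Nat.lt_or_ge i (j + 1) with h' | h'
        · exact hn i (by omega)
        · have : i = j + 1 := by omega
          subst this; exact hnot
      · refine Or.inr ⟨k, by rw [hstep]; exact e, by omega, hp, ?_⟩
        intro i hlt hle
        rcases Nat.lt_or_ge i (j + 1) with h' | h'
        · exact hmx i hlt (by omega)
        · have : i = j + 1 := by omega
          subst this; exact hnot

lemma prefix_take_drop_iff (s sub : List Char) (m i : Nat) (hsub : sub ≠ []) :
    sub <+: (s.take m).drop i ↔ sub <+: s.drop i ∧ i + sub.length ≤ m := by
  rw [List.drop_take, List.prefix_take_iff]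
  constructor
  · rintro ⟨h1, h2⟩
    refine ⟨h1, ?_⟩
    have : 1 ≤ sub.length := by cases sub <;> simp_all
    omega
  · rintro ⟨h1, h2⟩
    exact ⟨h1, by omega⟩

-- characterisation of rfindFrom s sub 0 (some e) for 0 ≤ e and nonempty sub
lemma rfindFrom0_eq_rfind_take (s sub : List Char) (e : Int) (he : 0 ≤ e) :
    PySem.Chars.rfindFrom s sub 0 (some e) =
    (if PySem.Chars.rfind (s.take (min e.toNat s.length)) sub = -1 then -1
     else PySem.Chars.rfind (s.take (min e.toNat s.length)) sub) := by
  unfold PySem.Chars.rfindFrom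
  dsimp only
  by_cases h1 : (s.length : Int) < e
  · have h2 : ¬ ((s.length : Int) < 0) := by omega
    have h3 : min e.toNat s.length = s.length := by omega
    simp [h1, h2, h3]
  · have h2 : ¬ (e < 0) := by omega
    have h4 : min e.toNat s.length = e.toNat := by omega
    simp [h1, h2, h4]

lemma rfindFrom0_cases (s sub : List Char) (e : Int) (he : 0 ≤ e) (hsub : sub ≠ []) :
    (PySem.Chars.rfindFrom s sub 0 (some e) = -1 ∧
      ∀ i : Nat, i + sub.length ≤ min e.toNat s.length → ¬ sub <+: s.drop i) ∨
    (∃ k : Nat, PySem.Chars.rfindFrom s sub 0 (some e) = (k : Int) ∧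
      k + sub.length ≤ min e.toNat s.length ∧ sub <+: s.drop k ∧
      ∀ i : Nat, k < i → i + sub.length ≤ min e.toNat s.length → ¬ sub <+: s.drop i) := by
  have hkey := rfindFrom0_eq_rfind_take s sub e he
  have hlen1 : 1 ≤ sub.length := by cases sub <;> simp_all
  have hms : (s.take (min e.toNat s.length)).length = min e.toNat s.length := by simp
  have hr : PySem.Chars.rfind (s.take (min e.toNat s.length)) sub =
      PySem.Chars.rfind.go (s.take (min e.toNat s.length)) sub
        (s.take (min e.toNat s.length)).length := rfl
  rcases go_cases (s.take (min e.toNat s.length)) sub (s.take (min e.toNat s.length)).length with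
    ⟨hgo, hn⟩ | ⟨k, hgo, hk, hp, hmx⟩
  · left
    refine ⟨by rw [hkey, hr, hgo]; simp, ?_⟩
    intro i hi hpre
    exact hn i (by omega) ((prefix_take_drop_iff s sub (min e.toNat s.length) i hsub).2 ⟨hpre, hi⟩)
  · right
    have hp' := (prefix_take_drop_iff s sub (min e.toNat s.length) k hsub).1 hp
    refine ⟨k, ?_, hp'.2, hp'.1, ?_⟩
    · rw [hkey, hr, hgo]
      have : ¬ ((k : Int) = -1) := by omega
      simp [this]
    · intro i hlt hi hpre
      exact hmx i hlt (by omega)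
        ((prefix_take_drop_iff s sub (min e.toNat s.length) i hsub).2 ⟨hpre, hi⟩)

-- extending a prefix by the next character of the list
lemma prefix_snoc (l t : List Char) (c : Char) (h : l <+: t) (hc : t[l.length]? = some c) :
    l ++ [c] <+: t := by
  obtain ⟨r, rfl⟩ := h
  rw [List.getElem?_append_right (le_refl _)] at hc
  simp at hc
  cases r with
  | nil => simp at hc
  | cons x r' =>
    simp at hc
    subst hc
    exact ⟨r', by simp⟩

lemma occG_of (s : List Char) (k : Nat) (h : Occ4 s k)
    (hc : s[k + 4]? = some ' ' ∨ s[k + 4]? = some '>') : OccG s k := by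
  have hdrop : ∀ c : Char, s[k + 4]? = some c → ("<w:p".toList ++ [c]) <+: s.drop k := by
    intro c hcc
    refine prefix_snoc _ _ _ h ?_
    have h4 : ("<w:p".toList : List Char).length = 4 := by decide
    rw [h4, List.getElem?_drop, hcc]
  rcases hc with hc | hc
  · exact Or.inl (by have := hdrop ' ' hc; simpa using this)
  · exact Or.inr (by have := hdrop '>' hc; simpa using this)

-- the character test A's slice performs, in terms of the list
lemma take_one_eq_singleton_iff (t : List Char) (c : Char) : t.take 1 = [c] ↔ t[0]? = some c := by
  cases t <;> simp

lemma slice_next_char (doc_xml : String) (k : Nat) (c : Char) :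
    PySem.Str.slice doc_xml (some ((k : Int) + 4)) (some ((k : Int) + 5)) = String.ofList [c] ↔
      doc_xml.toList[k + 4]? = some c := by
  have hs : (PySem.Str.slice doc_xml (some ((k : Int) + 4)) (some ((k : Int) + 5))).toList =
      (doc_xml.toList.drop (k + 4)).take 1 := by
    rw [PySem.Str.toList_slice, PySem.Chars.slice_eq_listSlice,
      PySem.List.slice_toNat _ (by positivity) (by positivity)]
    have h4 : ((k : Int) + 4).toNat = k + 4 := by omega
    have h5 : ((k : Int) + 5).toNat = k + 5 := by omega
    rw [h4, h5]
    congr 1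
    omega
  rw [← String.toList_inj, hs, String.toList_ofList, take_one_eq_singleton_iff,
    List.getElem?_drop]

lemma slice_space_iff (doc_xml : String) (k : Nat) :
    PySem.Str.slice doc_xml (some ((k : Int) + 4)) (some ((k : Int) + 5)) = " " ↔
      doc_xml.toList[k + 4]? = some ' ' := by
  rw [show (" " : String) = String.ofList [' '] from rfl]
  exact slice_next_char doc_xml k ' '

lemma slice_gt_iff (doc_xml : String) (k : Nat) :
    PySem.Str.slice doc_xml (some ((k : Int) + 4)) (some ((k : Int) + 5)) = ">" ↔
      doc_xml.toList[k + 4]? = some '>' := by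
  rw [show (">" : String) = String.ofList ['>'] from rfl]
  exact slice_next_char doc_xml k '>'

-- B port satisfies the characterisation
lemma altB_isres (doc_xml : String) (pos : Int) (h : 0 ≤ pos) :
    IsRes doc_xml.toList (min (pos + 1).toNat doc_xml.toList.length)
      (find_para_start_alt doc_xml pos) := by
  have hnl : ¬ pos < 0 := by omega
  have he : (0 : Int) ≤ pos + 1 := by omega
  have hla : ("<w:p ".toList : List Char).length = 5 := by decide
  have hlb : ("<w:p>".toList : List Char).length = 5 := by decide
  have hB : find_para_start_alt doc_xml pos =
      max (PySem.Chars.rfindFrom doc_xml.toList "<w:p ".toList 0 (some (pos + 1)))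
          (PySem.Chars.rfindFrom doc_xml.toList "<w:p>".toList 0 (some (pos + 1))) := by
    simp [find_para_start_alt, hnl]
  rcases rfindFrom0_cases doc_xml.toList "<w:p ".toList (pos + 1) he (by decide) with
    ⟨ea, na⟩ | ⟨ka, ea, wa, ga, mxa⟩ <;>
    rcases rfindFrom0_cases doc_xml.toList "<w:p>".toList (pos + 1) he (by decide) with
      ⟨eb, nb⟩ | ⟨kb, eb, wb, gb, mxb⟩
  · left
    refine ⟨by rw [hB, ea, eb]; omega, ?_⟩
    rintro i hi (hg | hg)
    · exact na i (by rw [hla]; omega) hg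
    · exact nb i (by rw [hlb]; omega) hg
  · right
    refine ⟨kb, by rw [hB, ea, eb]; omega, by omega, Or.inr gb, ?_⟩
    rintro i hlt hi (hg | hg)
    · exact na i (by rw [hla]; omega) hg
    · exact mxb i hlt (by rw [hlb]; omega) hg
  · right
    refine ⟨ka, by rw [hB, ea, eb]; omega, by omega, Or.inl ga, ?_⟩
    rintro i hlt hi (hg | hg)
    · exact mxa i hlt (by rw [hla]; omega) hg
    · exact nb i (by rw [hlb]; omega) hg
  · right
    refine ⟨max ka kb, by rw [hB, ea, eb]; omega, by omega, ?_, ?_⟩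
    · rcases Nat.le_total ka kb with hle | hle
      · rw [Nat.max_eq_right hle]; exact Or.inr gb
      · rw [Nat.max_eq_left hle]; exact Or.inl ga
    · rintro i hlt hi (hg | hg)
      · exact mxa i (by omega) (by rw [hla]; omega) hg
      · exact mxb i (by omega) (by rw [hlb]; omega) hg

-- A's loop satisfies the characterisation
lemma loopA_isres (doc_xml : String) (M : Nat) (fuel : Nat) :
    ∀ e : Int, e.toNat < fuel →
    (∀ i : Nat, OccG doc_xml.toList i → i + 5 ≤ M → (i : Int) + 4 ≤ e) →
    (∀ i : Nat, OccG doc_xml.toList i → i + 4 ≤ min e.toNat doc_xml.toList.length → i + 5 ≤ M) →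
    IsRes doc_xml.toList M (findParaLoopA doc_xml fuel e) := by
  induction fuel with
  | zero => intro e hf _ _; omega
  | succ fuel ih =>
    intro e hf inv1 inv2
    by_cases he0 : 0 ≤ e
    · have hA : findParaLoopA doc_xml (fuel + 1) e =
          (let idx := PySem.Chars.rfindFrom doc_xml.toList "<w:p".toList 0 (some e)
           if idx = -1 then -1
           else
             let next_char := PySem.Str.slice doc_xml (some (idx + 4)) (some (idx + 5))
             if next_char = " " ∨ next_char = ">" then idx
             else findParaLoopA doc_xml fuel (idx - 1)) := by
        simp [findParaLoopA, he0]
      have h44 : ("<w:p".toList : List Char).length = 4 := by decide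
      rcases rfindFrom0_cases doc_xml.toList "<w:p".toList e he0 (by decide) with
        ⟨e4, n4⟩ | ⟨k, e4, w4, g4, mx4⟩
      · -- no "<w:p" in the window at all
        left
        refine ⟨by rw [hA, e4]; simp, ?_⟩
        intro i hi hg
        have h1 : (i : Int) + 4 ≤ e := inv1 i hg hi
        have h2 : i + 5 ≤ doc_xml.toList.length := occG_len _ _ hg
        rw [h44] at n4
        exact n4 i (by omega) (occG_occ4 _ _ hg)
      · have hkne : ¬ ((k : Int) = -1) := by omega
        have hocc4 : Occ4 doc_xml.toList k := g4
        rw [h44] at w4 mx4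
        by_cases hcond : doc_xml.toList[k + 4]? = some ' ' ∨ doc_xml.toList[k + 4]? = some '>'
        · -- the occurrence at k is good: A returns k
          have hgood : OccG doc_xml.toList k := occG_of _ _ hocc4 hcond
          have hcc : (PySem.Str.slice doc_xml (some ((k : Int) + 4)) (some ((k : Int) + 5)) = " " ∨
              PySem.Str.slice doc_xml (some ((k : Int) + 4)) (some ((k : Int) + 5)) = ">") := by
            rcases hcond with hc | hc
            · exact Or.inl ((slice_space_iff doc_xml k).2 hc)
            · exact Or.inr ((slice_gt_iff doc_xml k).2 hc)
          have hret : findParaLoopA doc_xml (fuel + 1) e = (k : Int) := by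
            rw [hA, e4]
            simp only [hkne, if_false]
            simp only [if_pos hcc]
          right
          refine ⟨k, hret, inv2 k hgood (by omega), hgood, ?_⟩
          intro i hlt hi hg
          have h1 : (i : Int) + 4 ≤ e := inv1 i hg hi
          have h2 : i + 5 ≤ doc_xml.toList.length := occG_len _ _ hg
          exact mx4 i hlt (by omega) (occG_occ4 _ _ hg)
        · -- not good: A recurses with search_from = k - 1
          have hnotg : ¬ OccG doc_xml.toList k := fun hg => hcond (occG_char _ _ hg)
          have hcc : ¬ (PySem.Str.slice doc_xml (some ((k : Int) + 4)) (some ((k : Int) + 5)) = " " ∨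
              PySem.Str.slice doc_xml (some ((k : Int) + 4)) (some ((k : Int) + 5)) = ">") := by
            rintro (hc | hc)
            · exact hcond (Or.inl ((slice_space_iff doc_xml k).1 hc))
            · exact hcond (Or.inr ((slice_gt_iff doc_xml k).1 hc))
          have hrec : findParaLoopA doc_xml (fuel + 1) e =
              findParaLoopA doc_xml fuel ((k : Int) - 1) := by
            rw [hA, e4]
            simp only [hkne, if_false]
            simp only [if_neg hcc]
          rw [hrec]
          -- every good occurrence inside the window lies at least 5 below k
          have hbelow : ∀ i : Nat, OccG doc_xml.toList i → i + 5 ≤ M → i + 5 ≤ k := by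
            intro i hg hi
            have h1 : (i : Int) + 4 ≤ e := inv1 i hg hi
            have h2 : i + 5 ≤ doc_xml.toList.length := occG_len _ _ hg
            have hle : i ≤ k := by
              by_contra hgt
              exact mx4 i (by omega) (by omega) (occG_occ4 _ _ hg)
            have hne : i ≠ k := fun hh => hnotg (hh ▸ hg)
            exact good_gap _ k i hocc4 hg (by omega)
          apply ih
          · omega
          · intro i hg hi
            have := hbelow i hg hi
            omega
          · intro i hg hi
            refine inv2 i hg ?_
            omega
    · -- e < 0 : the loop stops with -1 and no good occurrence fits the window
      have hstop : findParaLoopA doc_xml (fuel + 1) e = -1 := by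
        simp [findParaLoopA, he0]
      left
      refine ⟨hstop, ?_⟩
      intro i hi hg
      have := inv1 i hg hi
      omega

-- ===== VERDICT (by name: the statement is the Claim_ definition above) =====
theorem find_para_start_spec : Claim_equal_find_para_start := by
  intro doc_xml pos _
  unfold Spec_find_para_start
  by_cases h : pos < 0
  · have h2 : ¬ (0:Int) ≤ pos := by omega
    simp [find_para_start, find_para_start_alt, findParaLoopA, h, h2]
  · have h' : (0:Int) ≤ pos := by omega
    have hA := loopA_isres doc_xml (min (pos + 1).toNat doc_xml.toList.length) (pos.toNat + 1) pos
      (by omega)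
      (by intro i hg hm; omega)
      (by intro i hg hm
          have := occG_len _ _ hg
          omega)
    have hB := altB_isres doc_xml pos h'
    exact isres_unique _ _ _ _ hA hB
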